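-- pv_equiv track=rewrite | github.com/kritishmohapatra/GFG_SOLUTIONS | Difficulty: Medium/Trail of ones/trail-of-ones.py | countConsec
-- ===== SOURCE A (Python) =====
-- def countConsec(n: int) -> int:
--     # code here
--     if n==2:
--         return 1
--     prev=0
--     curr=1
--     nxt=0
--     ans=1
--     for i in range(3, n+1):
--         nxt=prev+curr
--         ans=ans*2+nxt
--         prev=curr
--         curr=nxt
--     return ans
-- ===== SOURCE B (Python) =====
-- def _fib_pair(k: int):
--     # fast-doubling Fibonacci: returns (F(k), F(k+1))
--     if k == 0:
--         return (0, 1)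
--     a, b = _fib_pair(k >> 1)
--     c = a * (2 * b - a)
--     d = a * a + b * b
--     if k & 1:
--         return (d, c + d)
--     return (c, d)
--
-- def countConsec(n: int) -> int:
--     # number of length-n binary strings with two consecutive ones = 2^n - F(n+2)
--     if n < 2:
--         return 0
--     return (1 << n) - _fib_pair(n + 2)[0]
-- ===== Notes on version B (the rewrite author's own statement) =====
-- stated objective: faster
-- what changed: Replaced the O(n)-iteration doubling+Fibonacci loop by the closed form 2^n - F(n+2) computed with fast-doubling Fibonacci: O(log n) arithmetic steps instead of O(n).
-- intended difference: For n in {0,1} (inside the natural domain n >= 0) A returns 1, its never-updated initial accumulator, while B returns 0, the correct count of length-n binary strings containing two consecutive ones. — e.g. on countConsec(1): A returns 1, B returns 0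
-- outside the precondition, e.g. on countConsec(-5): A returns 1, B returns 0
import Mathlib
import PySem

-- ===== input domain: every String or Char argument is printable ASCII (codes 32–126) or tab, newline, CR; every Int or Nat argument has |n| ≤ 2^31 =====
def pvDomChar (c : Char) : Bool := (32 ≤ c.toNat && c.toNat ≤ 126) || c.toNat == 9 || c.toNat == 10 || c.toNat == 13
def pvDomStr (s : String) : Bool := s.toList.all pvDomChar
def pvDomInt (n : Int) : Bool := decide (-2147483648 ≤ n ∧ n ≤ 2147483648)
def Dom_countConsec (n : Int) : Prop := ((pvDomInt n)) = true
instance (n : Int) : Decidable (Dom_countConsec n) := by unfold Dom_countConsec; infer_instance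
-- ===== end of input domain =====

-- B replaces A's O(n)-iteration doubling+Fibonacci loop by the closed form 2^n - F(n+2)
-- computed with fast-doubling Fibonacci (objective: faster — O(log n) arithmetic steps instead of O(n)).

-- ===== PORT A =====
-- loop body of A: state (prev, curr, nxt, ans)
def stepA (st : Int × Int × Int × Int) (_i : Int) : Int × Int × Int × Int :=
  let (prev, curr, _nxt, ans) := st
  let nxt := prev + curr
  (curr, nxt, nxt, ans * 2 + nxt)

def countConsec (n : Int) : Int :=
  if n = 2 then 1
  else
    let st := (PySem.List.pyRange 3 (n + 1) 1).foldl stepA (0, 1, 0, 1)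
    st.2.2.2

-- ===== PORT B =====
-- fast-doubling Fibonacci from Source B: fibPair k = (F(k), F(k+1))
def fibPair (k : Nat) : Int × Int :=
  if h : k = 0 then (0, 1)
  else
    let p := fibPair (k / 2)
    let a := p.1
    let b := p.2
    let c := a * (2 * b - a)
    let d := a * a + b * b
    if k % 2 = 1 then (d, c + d) else (c, d)
termination_by k
decreasing_by exact Nat.div_lt_self (Nat.pos_of_ne_zero h) (by omega)

def countConsec_alt (n : Int) : Int :=
  if n < 2 then 0
  else 2 ^ n.toNat - (fibPair (n.toNat + 2)).1   -- 1 << n = 2^n (here n ≥ 2)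

-- ===== PRECONDITION & SPEC =====
-- Pre_ restricts to the function's natural domain n ≥ 0 (a count of binary-string lengths);
-- for negative n A returns its untouched initial accumulator 1 while B returns 0.
def Pre_countConsec (n : Int) : Prop := 0 ≤ n
instance (n : Int) : Decidable (Pre_countConsec n) := by unfold Pre_countConsec; infer_instance
def pvWitness_countConsec : Int := 5

-- For n in {0,1} A returns 1, its never-updated initial accumulator, while B returns 0,
-- the correct count of length-n binary strings containing two consecutive ones.
def D_countConsec (n : Int) : Prop := 0 ≤ n ∧ n ≤ 1
instance (n : Int) : Decidable (D_countConsec n) := by unfold D_countConsec; infer_instance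

def Spec_countConsec (n : Int) (out : Int) : Prop := ¬ D_countConsec n → out = countConsec_alt n
instance (n : Int) (out : Int) : Decidable (Spec_countConsec n out) := by unfold Spec_countConsec; infer_instance

def pvDiffWitness_countConsec : Int := 1
def pvDiffWitnessOut_countConsec : Int × Int := (1, 0)

-- ===== CLAIM (what is proved, stated in full; the proofs are below) =====
def Claim_unchanged_countConsec : Prop := ∀ (n : Int), Dom_countConsec n → Pre_countConsec n → Spec_countConsec n (countConsec n)
def Claim_changed_countConsec : Prop := Dom_countConsec (pvDiffWitness_countConsec) ∧ Pre_countConsec (pvDiffWitness_countConsec) ∧ D_countConsec (pvDiffWitness_countConsec) ∧ countConsec (pvDiffWitness_countConsec) = pvDiffWitnessOut_countConsec.1 ∧ countConsec_alt (pvDiffWitness_countConsec) = pvDiffWitnessOut_countConsec.2 ∧ pvDiffWitnessOut_countConsec.1 ≠ pvDiffWitnessOut_countConsec.2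
def Claim_exact_countConsec : Prop := ∀ (n : Int), Dom_countConsec n → Pre_countConsec n → D_countConsec n → countConsec n ≠ countConsec_alt n

-- ===== LEMMAS AND PROOFS =====

-- fast doubling is Fibonacci
lemma fibPair_eq (k : Nat) : fibPair k = ((Nat.fib k : Int), (Nat.fib (k + 1) : Int)) := by
  induction k using Nat.strong_induction_on with
  | _ k ih =>
    rw [fibPair]
    by_cases h : k = 0
    · simp [h]
    · simp only [h, dite_false]
      rw [ih (k / 2) (Nat.div_lt_self (Nat.pos_of_ne_zero h) (by omega))]
      have hle : Nat.fib (k / 2) ≤ 2 * Nat.fib (k / 2 + 1) :=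
        le_trans (Nat.fib_le_fib_succ) (by omega)
      by_cases hodd : k % 2 = 1
      · -- k = 2m + 1
        obtain ⟨m, hm⟩ : ∃ m, k = 2 * m + 1 := ⟨k / 2, by omega⟩
        have hk2 : k / 2 = m := by omega
        simp only [hk2, if_pos hodd]
        have h1 : Nat.fib k = Nat.fib (m + 1) ^ 2 + Nat.fib m ^ 2 := by
          rw [hm]; exact Nat.fib_two_mul_add_one m
        have h2 : (Nat.fib (k + 1) : Int) =
            (Nat.fib m : Int) * (2 * (Nat.fib (m + 1) : Int) - (Nat.fib m : Int)) +
            ((Nat.fib (m + 1) : Int) ^ 2 + (Nat.fib m : Int) ^ 2) := by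
          have hk1 : k + 1 = 2 * m + 1 + 1 := by omega
          rw [hk1, Nat.fib_add_two, Nat.fib_two_mul, Nat.fib_two_mul_add_one]
          have hle' : Nat.fib m ≤ 2 * Nat.fib (m + 1) :=
            le_trans (Nat.fib_le_fib_succ) (by omega)
          rw [Nat.cast_add, Nat.cast_mul, Nat.cast_sub hle']
          push_cast; ring
        refine Prod.ext ?_ ?_
        · show _ = (Nat.fib k : Int)
          rw [h1]; push_cast; ring
        · show _ = (Nat.fib (k + 1) : Int)
          rw [h2]; ring
      · -- k = 2m, m > 0
        obtain ⟨m, hm⟩ : ∃ m, k = 2 * m := ⟨k / 2, by omega⟩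
        have hk2 : k / 2 = m := by omega
        simp only [hk2, if_neg hodd]
        have hle' : Nat.fib m ≤ 2 * Nat.fib (m + 1) :=
          le_trans (Nat.fib_le_fib_succ) (by omega)
        refine Prod.ext ?_ ?_
        · show _ = (Nat.fib k : Int)
          rw [hm, Nat.fib_two_mul, Nat.cast_mul, Nat.cast_sub hle']
          push_cast; ring
        · show _ = (Nat.fib (k + 1) : Int)
          have hk1 : k + 1 = 2 * m + 1 := by omega
          rw [hk1, Nat.fib_two_mul_add_one]
          push_cast; ring

-- A's loop invariant: after processing range(3, m+3) the state is
-- (F(m), F(m+1), x, 2^(m+2) - F(m+4))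
lemma loopA (m : Nat) : ∃ x,
    (PySem.List.pyRange 3 ((m : Int) + 3) 1).foldl stepA (0, 1, 0, 1) =
      ((Nat.fib m : Int), (Nat.fib (m + 1) : Int), x, 2 ^ (m + 2) - (Nat.fib (m + 4) : Int)) := by
  induction m with
  | zero =>
    refine ⟨0, ?_⟩
    rw [PySem.List.pyRange_one_eq_nil (by omega)]
    simp [Nat.fib]
  | succ m ih =>
    obtain ⟨x, hx⟩ := ih
    have hsplit : (PySem.List.pyRange 3 ((m : Int) + 1 + 3) 1) =
        PySem.List.pyRange 3 ((m : Int) + 3) 1 ++ [(m : Int) + 3] := by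
      have := PySem.List.pyRange_one_succ_right (a := 3) (b := (m : Int) + 3) (by omega)
      rw [show ((m : Int) + 1 + 3) = ((m : Int) + 3) + 1 by ring, this]
    have hc : (((m + 1 : Nat)) : Int) + 3 = (m : Int) + 1 + 3 := by push_cast; ring
    rw [hc, hsplit, List.foldl_append, hx]
    refine ⟨(Nat.fib m : Int) + (Nat.fib (m + 1) : Int), ?_⟩
    simp only [List.foldl_cons, List.foldl_nil, stepA]
    have hf2 : (Nat.fib (m + 2) : Int) = (Nat.fib m : Int) + (Nat.fib (m + 1) : Int) := by
      rw [Nat.fib_add_two]; push_cast; ring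
    have hf5 : (Nat.fib (m + 5) : Int) = (Nat.fib (m + 4) : Int) + (Nat.fib (m + 3) : Int) := by
      rw [show m + 5 = m + 3 + 2 by ring, Nat.fib_add_two]; push_cast; ring
    have hf4 : (Nat.fib (m + 4) : Int) = (Nat.fib (m + 3) : Int) + (Nat.fib (m + 2) : Int) := by
      rw [show m + 4 = m + 2 + 2 by ring, Nat.fib_add_two]; push_cast; ring
    have hp : (2 : Int) ^ (m + 3) = 2 * 2 ^ (m + 2) := by
      rw [show m + 3 = m + 2 + 1 by ring, pow_succ]; ring
    refine Prod.ext rfl (Prod.ext ?_ (Prod.ext rfl ?_)) <;> simp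
    · rw [show m + 1 + 1 = m + 2 by ring]
      omega
    · rw [show m + 1 + 2 = m + 3 by ring, show m + 1 + 4 = m + 5 by ring]
      omega

-- main equality for n ≥ 2
lemma main_eq (n : Int) (hn : 2 ≤ n) : countConsec n = countConsec_alt n := by
  set m : Nat := n.toNat - 2 with hm
  have hn' : n = (m : Int) + 2 := by omega
  obtain ⟨x, hx⟩ := loopA m
  have hA : countConsec n = 2 ^ (m + 2) - (Nat.fib (m + 4) : Int) := by
    by_cases h2 : n = 2
    · have hm0 : m = 0 := by omega
      subst h2
      have : countConsec 2 = 1 := rfl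
      rw [this, hm0]
      decide
    · rw [countConsec, if_neg h2]
      have : n + 1 = (m : Int) + 3 := by omega
      rw [this, hx]
  have hB : countConsec_alt n = 2 ^ (m + 2) - (Nat.fib (m + 4) : Int) := by
    rw [countConsec_alt, if_neg (by omega)]
    have ht : n.toNat = m + 2 := by omega
    rw [ht, fibPair_eq]
  rw [hA, hB]

-- ===== VERDICT (by name: the statement is the Claim_ definition above) =====
theorem countConsec_spec : Claim_unchanged_countConsec := by
  intro n _ hPre hD
  have hn : 2 ≤ n := by
    unfold Pre_countConsec at hPre
    unfold D_countConsec at hD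
    omega
  exact main_eq n hn

theorem countConsec_changed : Claim_changed_countConsec := by
  unfold Claim_changed_countConsec; decide

theorem countConsec_tight : Claim_exact_countConsec := by
  intro n _ _ hD
  unfold D_countConsec at hD
  obtain ⟨h0, h1⟩ := hD
  interval_cases n
  · decide
  · decide
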